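-- pv_equiv track=rewrite | github.com/Yarin78/advent-of-code | src/year2024/day24.py | create_adder
-- ===== SOURCE A (Python) =====
-- def read_gates(section):
--     gate_by_output = {}
--     for gate in section:
--         a, op, b, _, c = gate.split(' ')
--         assert c not in gate_by_output
--         gate_by_output[c] = (a, op, b)
--     return gate_by_output
--
-- def create_adder(num_bits):
--     section = []
--     section.append("x00 XOR y00 -> z00")
--
--     section.append("x00 AND y00 -> b01")
--     section.append("x01 XOR y01 -> d01")
--     section.append("b01 XOR d01 -> z01")
--
--     for bit in range(2, num_bits):
--         section.append(f"x{bit-1:02} AND y{bit-1:02} -> a{bit:02}")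
--         section.append(f"x{bit:02} XOR y{bit:02} -> b{bit:02}")
--         section.append(f"b{bit-1:02} AND d{bit-1:02} -> c{bit:02}")
--         section.append(f"a{bit:02} OR c{bit:02} -> d{bit:02}")
--         section.append(f"b{bit:02} XOR d{bit:02} -> z{bit:02}")
--
--     return read_gates(section)
-- ===== SOURCE B (Python) =====
-- def create_adder(num_bits):
--     # One construction pass: build gate_by_output directly, no gate strings, no parsing.
--     gate_by_output = {
--         "z00": ("x00", "XOR", "y00"),
--         "b01": ("x00", "AND", "y00"),
--         "d01": ("x01", "XOR", "y01"),
--         "z01": ("b01", "XOR", "d01"),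
--     }
--     for bit in range(2, num_bits):
--         p, q = f"{bit-1:02}", f"{bit:02}"
--         gate_by_output[f"a{q}"] = (f"x{p}", "AND", f"y{p}")
--         gate_by_output[f"b{q}"] = (f"x{q}", "XOR", f"y{q}")
--         gate_by_output[f"c{q}"] = (f"b{p}", "AND", f"d{p}")
--         gate_by_output[f"d{q}"] = (f"a{q}", "OR", f"c{q}")
--         gate_by_output[f"z{q}"] = (f"b{q}", "XOR", f"d{q}")
--     return gate_by_output
-- ===== Notes on version B (the rewrite author's own statement) =====
-- stated objective: simpler
-- what changed: B builds gate_by_output in one construction pass with direct tuple assignments, eliminating A's intermediate list of gate-description strings and the read_gates split-and-parse second pass.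
import Mathlib
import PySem

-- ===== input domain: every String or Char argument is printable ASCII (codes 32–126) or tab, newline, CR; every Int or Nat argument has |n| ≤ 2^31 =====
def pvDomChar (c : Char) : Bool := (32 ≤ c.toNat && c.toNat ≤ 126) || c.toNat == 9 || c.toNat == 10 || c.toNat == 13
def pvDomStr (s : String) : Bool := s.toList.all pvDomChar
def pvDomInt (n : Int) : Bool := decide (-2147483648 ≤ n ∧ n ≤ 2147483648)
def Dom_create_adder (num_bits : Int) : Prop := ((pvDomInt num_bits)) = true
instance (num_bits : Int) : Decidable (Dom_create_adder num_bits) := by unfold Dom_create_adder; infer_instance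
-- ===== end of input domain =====

-- ===== PORT A =====
-- A builds a list of gate-description strings, then read_gates splits each on ' ' into
-- "a op b -> c" and inserts (a, op, b) under key c.  f"{v:02}" for the nonnegative values
-- used here is str(v) zero-padded to width 2 (PySem.Str.zfill).
def pvPadA (v : Int) : String := PySem.Str.zfill (PySem.Int.toStr v) 2

-- the five f-strings appended per bit
def pvGateStrsA (bit : Int) : List String :=
  [ "x" ++ pvPadA (bit-1) ++ " AND y" ++ pvPadA (bit-1) ++ " -> a" ++ pvPadA bit
  , "x" ++ pvPadA bit ++ " XOR y" ++ pvPadA bit ++ " -> b" ++ pvPadA bit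
  , "b" ++ pvPadA (bit-1) ++ " AND d" ++ pvPadA (bit-1) ++ " -> c" ++ pvPadA bit
  , "a" ++ pvPadA bit ++ " OR c" ++ pvPadA bit ++ " -> d" ++ pvPadA bit
  , "b" ++ pvPadA bit ++ " XOR d" ++ pvPadA bit ++ " -> z" ++ pvPadA bit ]

-- read_gates: 'a, op, b, _, c = gate.split(' ')' then gate_by_output[c] = (a, op, b).
-- Every string A feeds in has exactly 5 space-separated tokens with distinct keys c, so the
-- 5-way unpack always succeeds (the fallback branch is unreachable) and the assert never fires.
def read_gates (sec : List String) : PySem.Dict String (String × String × String) :=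
  sec.foldl (fun d gate =>
    match PySem.Str.split? gate " " with
    | some [a, op, b, _, c] => d.insert c (a, op, b)
    | _ => d) PySem.Dict.empty

def create_adder (num_bits : Int) : List (String × String × String × String) :=
  let sec0 : List String :=
    [ "x00 XOR y00 -> z00"
    , "x00 AND y00 -> b01"
    , "x01 XOR y01 -> d01"
    , "b01 XOR d01 -> z01" ]
  let sec := (PySem.List.pyRange 2 num_bits 1).foldl (fun s bit => s ++ pvGateStrsA bit) sec0
  (read_gates sec).items

-- ===== PORT B =====
-- B builds gate_by_output directly in one construction pass (no gate strings, no parsing): simpler.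
def pvPadB (v : Int) : String := PySem.Str.zfill (PySem.Int.toStr v) 2

def pvInit : PySem.Dict String (String × String × String) :=
  ((((PySem.Dict.empty.insert "z00" ("x00", "XOR", "y00")).insert
      "b01" ("x00", "AND", "y00")).insert
      "d01" ("x01", "XOR", "y01")).insert
      "z01" ("b01", "XOR", "d01"))

def pvStepB (g : PySem.Dict String (String × String × String)) (bit : Int) :
    PySem.Dict String (String × String × String) :=
  let p := pvPadB (bit-1)
  let q := pvPadB bit
  (((((g.insert ("a" ++ q) ("x" ++ p, "AND", "y" ++ p)).insert
       ("b" ++ q) ("x" ++ q, "XOR", "y" ++ q)).insert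
       ("c" ++ q) ("b" ++ p, "AND", "d" ++ p)).insert
       ("d" ++ q) ("a" ++ q, "OR", "c" ++ q)).insert
       ("z" ++ q) ("b" ++ q, "XOR", "d" ++ q))

def create_adder_alt (num_bits : Int) : List (String × String × String × String) :=
  ((PySem.List.pyRange 2 num_bits 1).foldl pvStepB pvInit).items

-- ===== PRECONDITION & SPEC =====
def Spec_create_adder (num_bits : Int) (out : List (String × String × String × String)) : Prop := out = create_adder_alt num_bits
instance (num_bits : Int) (out : List (String × String × String × String)) : Decidable (Spec_create_adder num_bits out) := by unfold Spec_create_adder; infer_instance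

-- ===== CLAIM (what is proved, stated in full; the proofs are below) =====
def Claim_equal_create_adder : Prop := ∀ (num_bits : Int), Dom_create_adder num_bits → Spec_create_adder num_bits (create_adder num_bits)

-- ===== LEMMAS AND PROOFS =====

-- Nat.digitChar never produces a space
lemma digitChar_ne_space (k : Nat) : Nat.digitChar k ≠ ' ' := by
  intro h
  by_cases hk : k < 16
  · interval_cases k <;> exact absurd h (by decide)
  · have h16 : Nat.digitChar k = '*' := by
      unfold Nat.digitChar
      repeat rw [if_neg (by omega)]
    rw [h16] at h
    exact absurd h (by decide)

lemma toDigitsCore_no_space (fuel : Nat) : ∀ (n : Nat) (ds : List Char),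
    ' ' ∉ ds → ' ' ∉ Nat.toDigitsCore 10 fuel n ds := by
  induction fuel with
  | zero => intro n ds h; simpa [Nat.toDigitsCore] using h
  | succ fuel ih =>
    intro n ds h
    simp only [Nat.toDigitsCore]
    split
    · intro hm
      rcases List.mem_cons.mp hm with h1 | h1
      · exact digitChar_ne_space _ h1.symm
      · exact h h1
    · apply ih
      intro hm
      rcases List.mem_cons.mp hm with h1 | h1
      · exact digitChar_ne_space _ h1.symm
      · exact h h1

lemma toChars_no_space (n : Int) : ' ' ∉ PySem.Int.toChars n := by
  unfold PySem.Int.toChars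
  split
  · intro hm
    rcases List.mem_cons.mp hm with h1 | h1
    · exact absurd h1.symm (by decide)
    · exact toDigitsCore_no_space _ _ _ (by simp) h1
  · exact toDigitsCore_no_space _ _ _ (by simp)

lemma zfill_no_space (cs : List Char) (w : Int) (h : ' ' ∉ cs) : ' ' ∉ PySem.Chars.zfill cs w := by
  unfold PySem.Chars.zfill
  split
  · exact h
  · match cs with
    | [] => simp
    | c :: rest =>
      simp only
      split
      · intro hm
        rcases List.mem_cons.mp hm with h1 | h1
        · exact h (h1 ▸ List.mem_cons_self)
        · rcases List.mem_append.mp h1 with h2 | h2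
          · exact absurd (List.eq_of_mem_replicate h2).symm (by decide)
          · exact h (List.mem_cons_of_mem _ h2)
      · intro hm
        rcases List.mem_append.mp hm with h2 | h2
        · exact absurd (List.eq_of_mem_replicate h2).symm (by decide)
        · exact h h2

lemma pad_no_space (v : Int) : ' ' ∉ (pvPadA v).toList := by
  simp only [pvPadA, PySem.Str.toList_zfill, PySem.Int.toList_toStr]
  exact zfill_no_space _ _ (toChars_no_space v)

-- splitOn on ' ': structural lemmas about the fuelled go
lemma go_acc (fuel : Nat) : ∀ (l cur : List Char) (acc : List (List Char)),
    PySem.Chars.splitOn.go [' '] fuel l cur acc = acc.reverse ++ PySem.Chars.splitOn.go [' '] fuel l cur [] := by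
  induction fuel with
  | zero => intro l cur acc; simp [PySem.Chars.splitOn.go]
  | succ fuel ih =>
    intro l cur acc
    match l with
    | [] => simp [PySem.Chars.splitOn.go]
    | c :: rest =>
      simp only [PySem.Chars.splitOn.go]
      split
      · rw [ih _ [] (cur.reverse :: acc), ih _ [] [cur.reverse]]
        simp
      · exact ih _ _ _

lemma go_skip (a : List Char) : ∀ (l cur : List Char) (acc : List (List Char)), ' ' ∉ a →
    PySem.Chars.splitOn.go [' '] ((a ++ l).length + 1) (a ++ l) cur acc
      = PySem.Chars.splitOn.go [' '] (l.length + 1) l (a.reverse ++ cur) acc := by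
  induction a with
  | nil => intro l cur acc _; simp
  | cons c a ih =>
    intro l cur acc h
    have hc : c ≠ ' ' := fun hc => h (hc ▸ List.mem_cons_self)
    simp only [List.cons_append, List.length_cons, PySem.Chars.splitOn.go]
    rw [if_neg (by simp [List.isPrefixOf]; exact fun h' => hc h'.symm)]
    rw [ih l (c :: cur) acc (fun hm => h (List.mem_cons_of_mem _ hm))]
    simp

lemma splitOn_token_cons (a rest : List Char) (h : ' ' ∉ a) :
    PySem.Chars.splitOn (a ++ ' ' :: rest) [' '] = a :: PySem.Chars.splitOn rest [' '] := by
  unfold PySem.Chars.splitOn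
  rw [go_skip a (' ' :: rest) [] [] h]
  simp only [List.length_cons, PySem.Chars.splitOn.go]
  rw [if_pos (by simp [List.isPrefixOf])]
  simp only [List.drop_succ_cons, List.append_nil]
  rw [go_acc]
  simp

lemma splitOn_single (a : List Char) (h : ' ' ∉ a) :
    PySem.Chars.splitOn a [' '] = [a] := by
  unfold PySem.Chars.splitOn
  have := go_skip a [] [] [] h
  simp only [List.append_nil] at this
  rw [this]
  simp [PySem.Chars.splitOn.go]

-- splitting a five-token string on ' '
lemma split5 (t1 t2 t3 t4 t5 : List Char)
    (h1 : ' ' ∉ t1) (h2 : ' ' ∉ t2) (h3 : ' ' ∉ t3) (h4 : ' ' ∉ t4) (h5 : ' ' ∉ t5) :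
    PySem.Chars.splitOn (t1 ++ ' ' :: (t2 ++ ' ' :: (t3 ++ ' ' :: (t4 ++ ' ' :: t5)))) [' ']
      = [t1, t2, t3, t4, t5] := by
  rw [splitOn_token_cons _ _ h1, splitOn_token_cons _ _ h2, splitOn_token_cons _ _ h3,
    splitOn_token_cons _ _ h4, splitOn_single _ h5]

lemma split?_5tok (g : String) (t1 t2 t3 t4 t5 : List Char)
    (hg : g.toList = t1 ++ ' ' :: (t2 ++ ' ' :: (t3 ++ ' ' :: (t4 ++ ' ' :: t5))))
    (h1 : ' ' ∉ t1) (h2 : ' ' ∉ t2) (h3 : ' ' ∉ t3) (h4 : ' ' ∉ t4) (h5 : ' ' ∉ t5) :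
    PySem.Str.split? g " "
      = some [String.ofList t1, String.ofList t2, String.ofList t3, String.ofList t4, String.ofList t5] := by
  simp only [PySem.Str.split?, PySem.Chars.split?]
  rw [show " ".toList = [' '] from rfl, hg, if_neg (by simp), split5 _ _ _ _ _ h1 h2 h3 h4 h5]
  simp

-- the fold step of read_gates, named so the proofs can talk about it
def pvParse (d : PySem.Dict String (String × String × String)) (gate : String) :
    PySem.Dict String (String × String × String) :=
  match PySem.Str.split? gate " " with
  | some [a, op, b, _, c] => d.insert c (a, op, b)
  | _ => d

lemma read_gates_eq (sec : List String) : read_gates sec = sec.foldl pvParse PySem.Dict.empty := rfl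

lemma pad_eq : pvPadA = pvPadB := rfl

lemma pvParse_gate (d : PySem.Dict String (String × String × String)) (g a op b c : String)
    (hg : g.toList = a.toList ++ ' ' :: (op.toList ++ ' ' :: (b.toList ++ ' ' :: (['-','>'] ++ ' ' :: c.toList))))
    (ha : ' ' ∉ a.toList) (hop : ' ' ∉ op.toList) (hb : ' ' ∉ b.toList) (hc : ' ' ∉ c.toList) :
    pvParse d g = d.insert c (a, op, b) := by
  unfold pvParse
  rw [split?_5tok g a.toList op.toList b.toList ['-','>'] c.toList hg ha hop hb (by decide) hc]
  simp [String.ofList_toList]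

lemma lit_pad_no_space (lit : String) (hlit : ' ' ∉ lit.toList) (v : Int) :
    ' ' ∉ (lit ++ pvPadA v).toList := by
  rw [String.toList_append]
  intro hm
  rcases List.mem_append.mp hm with h1 | h1
  · exact hlit h1
  · exact pad_no_space v h1

lemma parse_bit (d : PySem.Dict String (String × String × String)) (bit : Int) :
    List.foldl pvParse d (pvGateStrsA bit) = pvStepB d bit := by
  unfold pvStepB
  rw [← pad_eq]
  simp only [pvGateStrsA, List.foldl_cons, List.foldl_nil]
  rw [pvParse_gate _ ("x" ++ pvPadA (bit-1) ++ " AND y" ++ pvPadA (bit-1) ++ " -> a" ++ pvPadA bit)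
        ("x" ++ pvPadA (bit-1)) "AND" ("y" ++ pvPadA (bit-1)) ("a" ++ pvPadA bit)
        (by simp [String.toList_append])
        (lit_pad_no_space _ (by decide) _) (by decide) (lit_pad_no_space _ (by decide) _) (lit_pad_no_space _ (by decide) _)]
  rw [pvParse_gate _ ("x" ++ pvPadA bit ++ " XOR y" ++ pvPadA bit ++ " -> b" ++ pvPadA bit)
        ("x" ++ pvPadA bit) "XOR" ("y" ++ pvPadA bit) ("b" ++ pvPadA bit)
        (by simp [String.toList_append])
        (lit_pad_no_space _ (by decide) _) (by decide) (lit_pad_no_space _ (by decide) _) (lit_pad_no_space _ (by decide) _)]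
  rw [pvParse_gate _ ("b" ++ pvPadA (bit-1) ++ " AND d" ++ pvPadA (bit-1) ++ " -> c" ++ pvPadA bit)
        ("b" ++ pvPadA (bit-1)) "AND" ("d" ++ pvPadA (bit-1)) ("c" ++ pvPadA bit)
        (by simp [String.toList_append])
        (lit_pad_no_space _ (by decide) _) (by decide) (lit_pad_no_space _ (by decide) _) (lit_pad_no_space _ (by decide) _)]
  rw [pvParse_gate _ ("a" ++ pvPadA bit ++ " OR c" ++ pvPadA bit ++ " -> d" ++ pvPadA bit)
        ("a" ++ pvPadA bit) "OR" ("c" ++ pvPadA bit) ("d" ++ pvPadA bit)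
        (by simp [String.toList_append])
        (lit_pad_no_space _ (by decide) _) (by decide) (lit_pad_no_space _ (by decide) _) (lit_pad_no_space _ (by decide) _)]
  rw [pvParse_gate _ ("b" ++ pvPadA bit ++ " XOR d" ++ pvPadA bit ++ " -> z" ++ pvPadA bit)
        ("b" ++ pvPadA bit) "XOR" ("d" ++ pvPadA bit) ("z" ++ pvPadA bit)
        (by simp [String.toList_append])
        (lit_pad_no_space _ (by decide) _) (by decide) (lit_pad_no_space _ (by decide) _) (lit_pad_no_space _ (by decide) _)]

theorem create_adder_equality (num_bits : Int) :
    create_adder num_bits = create_adder_alt num_bits := by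
  show (read_gates (List.foldl (fun s bit => s ++ pvGateStrsA bit)
      ["x00 XOR y00 -> z00", "x00 AND y00 -> b01", "x01 XOR y01 -> d01", "b01 XOR d01 -> z01"]
      (PySem.List.pyRange 2 num_bits 1))).items
    = (List.foldl pvStepB pvInit (PySem.List.pyRange 2 num_bits 1)).items
  congr 1
  rw [PySem.List.foldl_append_eq_flatMap, read_gates_eq, List.foldl_append, List.foldl_flatMap]
  have h0 : List.foldl pvParse PySem.Dict.empty
      ["x00 XOR y00 -> z00", "x00 AND y00 -> b01", "x01 XOR y01 -> d01", "b01 XOR d01 -> z01"]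
      = pvInit := by decide
  rw [h0]
  rw [show (fun acc x => List.foldl pvParse acc (pvGateStrsA x)) = pvStepB from
    funext fun d => funext fun bit => parse_bit d bit]

-- ===== VERDICT (by name: the statement is the Claim_ definition above) =====
theorem create_adder_spec : Claim_equal_create_adder := by
  intro n _
  unfold Spec_create_adder
  exact create_adder_equality n
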